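-- pv_equiv track=rewrite | github.com/alanbui2808/Leetcode | heap/506_Relative_Ranks/solution.py | solution
-- ===== SOURCE A (Python) =====
-- import heapq
--
-- def solution(scores):
--   N = len(scores)
--   res = [i+1 for i in range(N)]
--
--   max_heap = [(-score, idx) for idx, score in enumerate(scores)]
--   heapq.heapify(max_heap)
--   pos = 1
--   title = None
--
--   while max_heap:
--     neg_score, idx = heapq.heappop(max_heap)
--
--     if pos==1:
--       title = "Gold Medal"
--     elif pos==2:
--       title = "Silver Medal"
--     elif pos==3:
--       title = "Bronze Medal"
--     else:
--       title = str(pos)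
--
--     res[idx] = title
--     pos += 1
--
--   return res
-- ===== SOURCE B (Python) =====
-- def solution(scores):
--     res = []
--     for i, si in enumerate(scores):
--         pos = 1 + sum(1 for j, sj in enumerate(scores) if sj > si or (sj == si and j < i))
--         if pos == 1:
--             res.append("Gold Medal")
--         elif pos == 2:
--             res.append("Silver Medal")
--         elif pos == 3:
--             res.append("Bronze Medal")
--         else:
--             res.append(str(pos))
--     return res
-- ===== Notes on version B (the rewrite author's own statement) =====
-- stated objective: alternative
-- what changed: Replaces the heap extraction and in-place assignment with a direct comparison-counting rank: each athlete's position is computed independently as 1 + the number of (score, index) pairs beating it, with no heap, no sort and no mutable result array.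
import Mathlib
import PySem

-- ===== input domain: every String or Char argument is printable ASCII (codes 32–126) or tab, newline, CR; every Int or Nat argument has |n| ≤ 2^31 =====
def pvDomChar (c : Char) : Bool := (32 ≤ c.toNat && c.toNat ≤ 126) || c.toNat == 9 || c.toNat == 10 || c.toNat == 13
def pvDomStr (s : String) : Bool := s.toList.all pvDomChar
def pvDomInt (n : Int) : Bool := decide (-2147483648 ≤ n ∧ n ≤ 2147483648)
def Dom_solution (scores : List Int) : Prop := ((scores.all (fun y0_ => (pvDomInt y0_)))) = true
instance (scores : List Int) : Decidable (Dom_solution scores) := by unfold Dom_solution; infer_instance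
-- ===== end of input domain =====

-- B replaces A's heap extraction and in-place assignment by an independent
-- comparison-counting rank per athlete (no heap, no sort, no mutation); objective: alternative.

-- ===== PORT A =====
-- Python's lexicographic '<' on the (-score, idx) int pairs heapq compares.
def pairLt (a b : Int × Int) : Bool := a.1 < b.1 || (a.1 == b.1 && a.2 < b.2)

-- heapq.heappop ported by its library contract: it returns the smallest element
-- (tuple order) of the heap and leaves the remaining multiset.  Exact: the heap's
-- internal layout is unobservable in A, and heapq's pop returns the minimum.
def popMin : (Int × Int) → List (Int × Int) → (Int × Int) × List (Int × Int)
  | x, [] => (x, [])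
  | x, y :: ys =>
      if pairLt y x then
        let r := popMin y ys
        (r.1, x :: r.2)
      else
        let r := popMin x ys
        (r.1, y :: r.2)

theorem popMin_length (x : Int × Int) (ys : List (Int × Int)) :
    ((popMin x ys).2).length = ys.length := by
  induction ys generalizing x with
  | nil => simp [popMin]
  | cons y ys ih => simp only [popMin]; split <;> simp [ih]

def titleOf (pos : Int) : String :=
  if pos = 1 then "Gold Medal"
  else if pos = 2 then "Silver Medal"
  else if pos = 3 then "Bronze Medal"
  else PySem.Int.toStr pos

-- A's 'while max_heap:' loop: pop, choose the title, assign it, advance pos.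
def heapLoop : List (Int × Int) → List String → Int → List String
  | [], res, _ => res
  | x :: xs, res, pos =>
      let r := popMin x xs
      heapLoop r.2 (PySem.List.pySetD res r.1.2 (titleOf pos)) (pos + 1)
  termination_by h _ _ => h.length
  decreasing_by simp [popMin_length]

def solution (scores : List Int) : List String :=
  let N := scores.length
  -- res = [i+1 for i in range(N)]: integer placeholders, every entry is
  -- overwritten with a string before return; typed here as their str() images.
  let res := (PySem.List.pyRange 0 (N : Int) 1).map (fun i => PySem.Int.toStr (i + 1))
  let heap := (PySem.List.enumerate scores).map (fun p => (-p.2, p.1))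
  heapLoop heap res 1

-- ===== PORT B =====
-- res = []; for i, si in enumerate(scores): count the beating pairs, append the title.
def solution_alt (scores : List Int) : List String :=
  (PySem.List.enumerate scores).foldl
    (fun res p =>
      res ++ [let pos := 1 + (PySem.List.enumerate scores).foldl
                (fun acc q => if q.2 > p.2 ∨ (q.2 = p.2 ∧ q.1 < p.1) then acc + 1 else acc) 0
              if pos = 1 then "Gold Medal"
              else if pos = 2 then "Silver Medal"
              else if pos = 3 then "Bronze Medal"
              else PySem.Int.toStr pos]) []

-- ===== PRECONDITION & SPEC =====
def Spec_solution (scores : List Int) (out : List String) : Prop := out = solution_alt scores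
instance (scores : List Int) (out : List String) : Decidable (Spec_solution scores out) := by unfold Spec_solution; infer_instance

-- ===== CLAIM =====
def Claim_equal_solution : Prop := ∀ (scores : List Int), Dom_solution scores → Spec_solution scores (solution scores)

-- ===== LEMMAS AND PROOFS =====

theorem pairLt_iff (a b : Int × Int) :
    pairLt a b = true ↔ (a.1 < b.1 ∨ (a.1 = b.1 ∧ a.2 < b.2)) := by
  simp [pairLt]

theorem pairLt_false_iff (a b : Int × Int) :
    pairLt a b = false ↔ ¬(a.1 < b.1 ∨ (a.1 = b.1 ∧ a.2 < b.2)) := by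
  rw [← Bool.not_eq_true, not_iff_not, pairLt_iff]

theorem popMin_perm (x : Int × Int) (ys : List (Int × Int)) :
    ((popMin x ys).1 :: (popMin x ys).2).Perm (x :: ys) := by
  induction ys generalizing x with
  | nil => simp [popMin]
  | cons y ys ih =>
      simp only [popMin]
      split
      · dsimp only
        exact (List.Perm.swap x _ _).trans ((ih y).cons x)
      · dsimp only
        exact ((List.Perm.swap y _ _).trans ((ih x).cons y)).trans (List.Perm.swap x y ys)

theorem popMin_min (x : Int × Int) (ys : List (Int × Int)) :
    ∀ z ∈ x :: ys, pairLt z (popMin x ys).1 = false := by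
  induction ys generalizing x with
  | nil =>
      intro z hz
      simp only [List.mem_cons, List.not_mem_nil, or_false] at hz
      subst hz
      simp only [popMin]
      rw [pairLt_false_iff]
      omega
  | cons y ys ih =>
      intro z hz
      simp only [popMin]
      split
      · rename_i hyx
        dsimp only
        rcases List.mem_cons.mp hz with rfl | hz2
        · have hm := ih y y (by simp)
          rw [pairLt_iff] at hyx
          rw [pairLt_false_iff] at hm ⊢
          omega
        · exact ih y z hz2
      · rename_i hyx
        dsimp only
        rcases List.mem_cons.mp hz with rfl | hz2
        · exact ih z z (by simp)
        · rcases List.mem_cons.mp hz2 with rfl | hz3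
          · have hm := ih x x (by simp)
            rw [Bool.not_eq_true, pairLt_false_iff] at hyx
            rw [pairLt_false_iff] at hm ⊢
            omega
          · exact ih x z (by simp [hz3])

-- the sequence of pairs A pops off the heap
def extract : List (Int × Int) → List (Int × Int)
  | [] => []
  | x :: xs => (popMin x xs).1 :: extract (popMin x xs).2
  termination_by h => h.length
  decreasing_by simp [popMin_length]

theorem extract_perm (h : List (Int × Int)) : (extract h).Perm h := by
  induction hn : h.length generalizing h with
  | zero => cases h <;> simp_all [extract]
  | succ n ih =>
      cases h with
      | nil => simp at hn
      | cons x xs =>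
          rw [extract]
          have hp := popMin_perm x xs
          have hlen : ((popMin x xs).2).length = n := by
            have := popMin_length x xs; simp at hn; omega
          exact (List.Perm.cons _ (ih _ hlen)).trans hp

theorem extract_pairwise (h : List (Int × Int)) :
    (extract h).Pairwise (fun a b => pairLt b a = false) := by
  induction hn : h.length generalizing h with
  | zero => cases h <;> simp_all [extract]
  | succ n ih =>
      cases h with
      | nil => simp at hn
      | cons x xs =>
          rw [extract]
          have hlen : ((popMin x xs).2).length = n := by
            have := popMin_length x xs; simp at hn; omega
          refine List.Pairwise.cons ?_ (ih _ hlen)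
          intro b hb
          have hbmem : b ∈ x :: xs :=
            (popMin_perm x xs).subset (List.mem_cons_of_mem _ ((extract_perm _).subset hb))
          exact popMin_min x xs b hbmem

-- heapLoop is the assignment loop along the extraction sequence
def assignLoop : List (Int × Int) → List String → Int → List String
  | [], res, _ => res
  | m :: ms, res, pos => assignLoop ms (PySem.List.pySetD res m.2 (titleOf pos)) (pos + 1)

theorem heapLoop_eq_assign (h : List (Int × Int)) (res : List String) (pos : Int) :
    heapLoop h res pos = assignLoop (extract h) res pos := by
  induction hn : h.length generalizing h res pos with
  | zero => cases h <;> simp_all [heapLoop, extract, assignLoop]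
  | succ n ih =>
      cases h with
      | nil => simp at hn
      | cons x xs =>
          rw [heapLoop, extract, assignLoop]
          have hlen : ((popMin x xs).2).length = n := by
            have := popMin_length x xs; simp at hn; omega
          exact ih _ _ _ hlen

-- the strict total order (on distinct indices) in which A pops the pairs
def SRel (key : Int → Int) (i j : Int) : Prop := key i < key j ∨ (key i = key j ∧ i < j)

-- Bool form of SRel, used as a countP predicate
def SRelB (key : Int → Int) (i j : Int) : Bool :=
  decide (key i < key j) || (decide (key i = key j) && decide (i < j))

theorem SRelB_iff (key : Int → Int) (i j : Int) : SRelB key i j = true ↔ SRel key i j := by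
  simp [SRelB, SRel]

-- ---------- the extraction sequence is the SRel-sorted index list ----------

theorem extract_sorted (scores : List Int) :
    (((extract ((PySem.List.enumerate scores).map (fun p => (-p.2, p.1)))).map (·.2)).Perm
        (PySem.List.pyRange 0 (scores.length : Int) 1)) ∧
    ((extract ((PySem.List.enumerate scores).map (fun p => (-p.2, p.1)))).map (·.2)).Pairwise
        (SRel (fun i => -(PySem.List.pyGetD scores i 0))) := by
  set heap := (PySem.List.enumerate scores).map (fun p => (-p.2, p.1)) with hheap
  set L := extract heap with hLdef
  have hperm : L.Perm heap := extract_perm heap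
  have hmap2 : heap.map (·.2) = PySem.List.pyRange 0 (scores.length : Int) 1 := by
    rw [hheap, List.map_map]
    have hc : ((fun x : Int × Int => x.2) ∘ fun p : Int × Int => (-p.2, p.1)) =
        (fun p : Int × Int => p.1) := rfl
    rw [hc, PySem.List.map_fst_enumerate]
    simp
  have hpermmap : (L.map (·.2)).Perm (PySem.List.pyRange 0 (scores.length : Int) 1) := by
    rw [← hmap2]; exact hperm.map _
  refine ⟨hpermmap, ?_⟩
  have hnodup : (L.map (·.2)).Nodup :=
    hpermmap.nodup_iff.mpr (PySem.List.nodup_pyRange_one 0 (scores.length : Int))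
  have hne : L.Pairwise (fun a b : Int × Int => a.2 ≠ b.2) := List.pairwise_map.mp hnodup
  have hkey : ∀ p ∈ L, p.1 = -(PySem.List.pyGetD scores p.2 0) := by
    intro p hp
    have hp2 : p ∈ heap := hperm.subset hp
    rw [hheap] at hp2
    rcases List.mem_map.mp hp2 with ⟨q, hq, rfl⟩
    rcases (PySem.List.mem_enumerate_iff _ _ _).mp hq with ⟨k, hlt, rfl⟩
    simp only [zero_add]
    rw [PySem.List.pyGetD_eq_getElem (i := (k : Int)) scores 0 (by omega) (by exact_mod_cast hlt)]
    simp
  rw [List.pairwise_map]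
  refine ((extract_pairwise heap).and hne).imp_of_mem ?_
  intro a b ha hb hab
  obtain ⟨hlt, hne2⟩ := hab
  rw [pairLt_false_iff] at hlt
  have hka := hkey a ha
  have hkb := hkey b hb
  unfold SRel
  dsimp only
  rw [← hka, ← hkb]
  omega

-- ---------- position in a strictly sorted list = number of smaller elements ----------

theorem countP_pos (key : Int → Int) (l : List Int)
    (hp : l.Pairwise (SRel key)) (k : Nat) (i : Int) (hk : l[k]? = some i) :
    l.countP (fun j => SRelB key j i) = k := by
  induction l generalizing k with
  | nil => simp at hk
  | cons x xs ih =>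
      rw [List.pairwise_cons] at hp
      cases k with
      | zero =>
          simp only [List.getElem?_cons_zero, Option.some_inj] at hk
          subst hk
          rw [List.countP_cons]
          have h0 : SRelB key x x = false := by simp [SRelB]
          rw [List.countP_eq_zero.mpr ?_]
          · simp [h0]
          · intro j hj
            have := hp.1 j hj
            unfold SRel at this
            simp only [SRelB]
            simpa using by omega
      | succ k =>
          simp only [List.getElem?_cons_succ] at hk
          have hmem : i ∈ xs := List.mem_of_getElem? hk
          have hxi : SRelB key x i = true := (SRelB_iff key x i).mpr (hp.1 i hmem)
          rw [List.countP_cons, ih hp.2 k hk]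
          simp [hxi]

-- ---------- lastWrite: the value A's assignment loop leaves in each cell ----------

def lastWrite : List (Int × Int) → Int → Nat → Option String
  | [], _, _ => none
  | m :: ms, pos, j =>
      match lastWrite ms (pos + 1) j with
      | some s => some s
      | none => if m.2 = (j : Int) then some (titleOf pos) else none

theorem assignLoop_getElem? (ms : List (Int × Int)) (res : List String) (pos : Int) (j : Nat)
    (hnn : ∀ m ∈ ms, 0 ≤ m.2) :
    (assignLoop ms res pos)[j]? =
      match lastWrite ms pos j with
      | some s => if j < res.length then some s else none
      | none => res[j]? := by
  induction ms generalizing res pos with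
  | nil => simp [assignLoop, lastWrite]
  | cons m ms ih =>
      rw [assignLoop, lastWrite]
      have h0 : 0 ≤ m.2 := hnn m (by simp)
      rw [ih _ _ (fun x hx => hnn x (by simp [hx])),
        PySem.List.pySetD_of_nonneg res (titleOf pos) h0]
      cases hlw : lastWrite ms (pos + 1) j with
      | some s => simp [List.length_set]
      | none =>
          dsimp only
          by_cases hj : m.2 = (j : Int)
          · rw [if_pos hj]
            dsimp only
            have htn : m.2.toNat = j := by omega
            rw [htn, List.getElem?_set]
            simp
          · rw [if_neg hj]
            dsimp only
            exact List.getElem?_set_ne (by omega)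

theorem lastWrite_none (ms : List (Int × Int)) (pos : Int) (j : Nat)
    (h : (j : Int) ∉ ms.map (·.2)) : lastWrite ms pos j = none := by
  induction ms generalizing pos with
  | nil => simp [lastWrite]
  | cons m ms ih =>
      simp only [List.map_cons, List.mem_cons] at h
      push Not at h
      rw [lastWrite, ih _ (h.2)]
      simp [Ne.symm h.1]

theorem lastWrite_at (ms : List (Int × Int)) (pos : Int) (j k : Nat)
    (hnd : (ms.map (·.2)).Nodup) (hk : (ms.map (·.2))[k]? = some (j : Int)) :
    lastWrite ms pos j = some (titleOf (pos + k)) := by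
  induction ms generalizing pos k with
  | nil => simp at hk
  | cons m ms ih =>
      rw [List.map_cons, List.nodup_cons] at hnd
      cases k with
      | zero =>
          simp only [List.map_cons, List.getElem?_cons_zero, Option.some_inj] at hk
          rw [lastWrite, lastWrite_none ms (pos + 1) j (by rw [← hk]; exact hnd.1)]
          simp [hk]
      | succ k =>
          simp only [List.map_cons, List.getElem?_cons_succ] at hk
          rw [lastWrite, ih _ k hnd.2 hk]
          norm_num
          ring_nf

-- ---------- B's fold is a map, and its count is a countP ----------

theorem foldl_append_map {α β : Type} (l : List α) (f : α → β) (init : List β) :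
    l.foldl (fun res p => res ++ [f p]) init = init ++ l.map f := by
  induction l generalizing init with
  | nil => simp
  | cons x xs ih => simp [ih]

-- ===== VERDICT =====
theorem solution_spec : Claim_equal_solution := by
  intro scores _
  unfold Spec_solution solution
  simp only []
  set N := scores.length with hN
  set heap := (PySem.List.enumerate scores).map (fun p => (-p.2, p.1)) with hheap
  set L := extract heap with hLdef
  obtain ⟨hperm, hpair⟩ := extract_sorted scores
  rw [heapLoop_eq_assign]
  have hnn : ∀ m ∈ L, 0 ≤ m.2 := by
    intro m hm
    have : m.2 ∈ L.map (·.2) := List.mem_map.mpr ⟨m, hm, rfl⟩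
    have := PySem.List.mem_pyRange_one.mp (hperm.subset this)
    omega
  have hnd : (L.map (·.2)).Nodup :=
    hperm.nodup_iff.mpr (PySem.List.nodup_pyRange_one 0 (N : Int))
  have hB : solution_alt scores = (PySem.List.enumerate scores).map (fun p =>
      let pos := 1 + (PySem.List.enumerate scores).foldl
        (fun acc q => if q.2 > p.2 ∨ (q.2 = p.2 ∧ q.1 < p.1) then acc + 1 else acc) 0
      if pos = 1 then "Gold Medal" else if pos = 2 then "Silver Medal"
      else if pos = 3 then "Bronze Medal" else PySem.Int.toStr pos) := by
    unfold solution_alt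
    rw [foldl_append_map]
    simp
  rw [hB]
  apply List.ext_getElem?
  intro j
  rw [assignLoop_getElem? L _ 1 j hnn]
  have hlenres : ((PySem.List.pyRange 0 (N : Int) 1).map
      (fun i => PySem.Int.toStr (i + 1))).length = N := by
    simp [PySem.List.length_pyRange_one]
  by_cases hj : j < N
  · have hjmem : ((j : Nat) : Int) ∈ L.map (·.2) :=
      hperm.mem_iff.mpr (PySem.List.mem_pyRange_one.mpr ⟨by omega, by exact_mod_cast hj⟩)
    obtain ⟨k, hklt, hkeq⟩ := List.mem_iff_getElem.mp hjmem
    have hk? : (L.map (·.2))[k]? = some ((j : Nat) : Int) := by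
      rw [List.getElem?_eq_getElem hklt, hkeq]
    rw [lastWrite_at L 1 j k hnd hk?]
    dsimp only
    have hjlen : j < ((PySem.List.pyRange 0 (N : Int) 1).map
        (fun i => PySem.Int.toStr (i + 1))).length := by rw [hlenres]; exact hj
    rw [if_pos hjlen]
    have hcnt : (L.map (·.2)).countP
        (fun t => SRelB (fun i => -(PySem.List.pyGetD scores i 0)) t (j : Int)) = k :=
      countP_pos _ _ hpair k (j : Int) hk?
    -- B side
    rw [List.getElem?_map, PySem.List.getElem?_enumerate,
      List.getElem?_eq_getElem (by omega : j < scores.length)]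
    simp only [Option.map_some, zero_add]
    congr 1
    have hgd : PySem.List.pyGetD scores ((j : Nat) : Int) 0 = scores[j] := by
      rw [PySem.List.pyGetD_eq_getElem (i := ((j : Nat) : Int)) scores 0 (by omega)
        (by exact_mod_cast hj)]
      simp
    have hfold : (PySem.List.enumerate scores).foldl
        (fun acc q => if q.2 > scores[j] ∨ (q.2 = scores[j] ∧ q.1 < ((j : Nat) : Int))
          then acc + 1 else acc) 0 = (k : Int) := by
      rw [PySem.List.foldl_ite_add_one]
      have hcnt2 : (PySem.List.enumerate scores).countP
          (fun q => decide (q.2 > scores[j] ∨ (q.2 = scores[j] ∧ q.1 < ((j : Nat) : Int)))) = k := by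
        rw [PySem.List.enumerate_eq_map_pyRange scores 0, List.countP_map]
        simp only [PySem.List.len_eq]
        rw [← hcnt, hperm.countP_eq]
        apply List.countP_congr
        intro t ht
        simp only [Function.comp, decide_eq_true_eq, SRelB, hgd, Bool.or_eq_true,
          Bool.and_eq_true]
        omega
      rw [hcnt2]
      omega
    rw [hfold]
    rfl
  · have hnotmem : ((j : Nat) : Int) ∉ L.map (·.2) := by
      intro hmem
      have := PySem.List.mem_pyRange_one.mp (hperm.subset hmem)
      omega
    rw [lastWrite_none L 1 j hnotmem]
    dsimp only
    rw [List.getElem?_eq_none (by omega), List.getElem?_eq_none ?_]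
    rw [List.length_map, PySem.List.length_enumerate]
    omega
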